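-- pv_equiv track=rewrite | github.com/adm116/Scripts | numOccurrences.py | directionalSearch
-- ===== SOURCE A (Python) =====
-- def directionalSearch(list, start, stop, num, left):
--     # base case
--     if start > stop:
--         return -1
--
--     mid = (stop + start) // 2
--     lastSeen = -1   # track if num is at mid, ie the last guaranteed place we've seen it
--     potential = -1  # track num potentially further left or right
--
--     if list[mid] == num: lastSeen = mid
--
--     if left:
--         if list[mid] >= num:
--             potential = directionalSearch(list, start, mid - 1, num, True)
--         else:
--             potential = directionalSearch(list, mid + 1, stop, num, True)
--     else:
--         if list[mid] <= num:
--             potential = directionalSearch(list, mid + 1, stop, num, False)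
--         else:
--             potential = directionalSearch(list, start, mid - 1, num, False)
--
--     return potential if potential != -1 else lastSeen
-- ===== SOURCE B (Python) =====
-- def directionalSearch(list, start, stop, num, left):
--     res = -1
--     lo, hi = start, stop
--     while lo <= hi:
--         mid = (lo + hi) // 2
--         v = list[mid]
--         if v == num:
--             res = mid
--         if left:
--             if v >= num:
--                 hi = mid - 1
--             else:
--                 lo = mid + 1
--         else:
--             if v <= num:
--                 lo = mid + 1
--             else:
--                 hi = mid - 1
--     return res
-- ===== Notes on version B (the rewrite author's own statement) =====
-- stated objective: simpler
-- what changed: Replaced the recursive binary search (which threads a 'potential' result back up through every call frame) by a single iterative loop with lo/hi bounds and a res accumulator overwritten on each match; no recursion and no post-merge of potential/lastSeen.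
-- outside the precondition, e.g. on directionalSearch([5, 5], -1, 1, 5, True): A returns 0, B returns -1; on directionalSearch([1, 2], 0, 2, 0, True): A returns -1, B returns -1
import Mathlib
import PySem

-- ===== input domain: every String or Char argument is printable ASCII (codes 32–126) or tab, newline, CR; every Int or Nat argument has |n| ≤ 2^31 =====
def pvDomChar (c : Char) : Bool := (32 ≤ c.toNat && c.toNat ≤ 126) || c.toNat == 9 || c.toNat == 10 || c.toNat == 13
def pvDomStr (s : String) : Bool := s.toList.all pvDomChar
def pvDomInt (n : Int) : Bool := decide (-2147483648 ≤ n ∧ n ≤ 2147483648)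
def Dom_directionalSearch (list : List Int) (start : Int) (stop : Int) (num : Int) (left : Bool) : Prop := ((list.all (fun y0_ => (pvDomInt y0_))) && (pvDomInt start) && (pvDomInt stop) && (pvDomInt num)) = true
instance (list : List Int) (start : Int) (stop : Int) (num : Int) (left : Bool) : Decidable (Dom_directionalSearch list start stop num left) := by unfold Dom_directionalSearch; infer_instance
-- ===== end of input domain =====

-- B replaces A's recursive directional binary search by an equivalent iterative lo/hi loop
-- with a result accumulator (same O(log) probes, no recursion); return-value equivalence only.


-- ===== PORT A =====
-- list[mid] is ported as pyGetD with default 0; the default is unreachable under Pre_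
-- (every probed index lies in [start, stop] ⊆ [0, len)).
def directionalSearch (list : List Int) (start : Int) (stop : Int) (num : Int) (left : Bool) : Int :=
  if start > stop then -1
  else
    let mid := PySem.Int.floordiv (stop + start) 2
    let lastSeen : Int := if PySem.List.pyGetD list mid 0 = num then mid else -1
    let potential : Int :=
      if left then
        if PySem.List.pyGetD list mid 0 ≥ num then
          directionalSearch list start (mid - 1) num true
        else
          directionalSearch list (mid + 1) stop num true
      else
        if PySem.List.pyGetD list mid 0 ≤ num then
          directionalSearch list (mid + 1) stop num false
        else
          directionalSearch list start (mid - 1) num false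
    if potential ≠ -1 then potential else lastSeen
termination_by (stop + 1 - start).toNat
decreasing_by
  all_goals
    have hb := PySem.Int.floordiv_two_mid_bounds (lo := start) (hi := stop) (by omega)
    rw [Int.add_comm stop start]
    omega

-- ===== PORT B =====
-- the while-loop of Source B, as a tail-recursive helper over its state (lo, hi, res)
def dsLoop (list : List Int) (num : Int) (left : Bool) (lo : Int) (hi : Int) (res : Int) : Int :=
  if lo > hi then res
  else
    let mid := PySem.Int.floordiv (lo + hi) 2
    let v := PySem.List.pyGetD list mid 0
    let res' := if v = num then mid else res
    if left then
      if v ≥ num then dsLoop list num left lo (mid - 1) res'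
      else dsLoop list num left (mid + 1) hi res'
    else
      if v ≤ num then dsLoop list num left (mid + 1) hi res'
      else dsLoop list num left lo (mid - 1) res'
termination_by (hi + 1 - lo).toNat
decreasing_by
  all_goals
    have hb := PySem.Int.floordiv_two_mid_bounds (lo := lo) (hi := hi) (by omega)
    omega

def directionalSearch_alt (list : List Int) (start : Int) (stop : Int) (num : Int) (left : Bool) : Int :=
  dsLoop list num left start stop (-1)

-- ===== PRECONDITION & SPEC =====
-- Pre_ excludes non-empty windows that stick out of [0, len): there the data-dependent probe
-- sequence may reach an out-of-range index (IndexError) or use Python's negative-index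
-- wraparound, where A's results collide with its -1 "not found" sentinel and are accidental.
def Pre_directionalSearch (list : List Int) (start : Int) (stop : Int) (num : Int) (left : Bool) : Prop :=
  start > stop ∨ (0 ≤ start ∧ stop < (list.length : Int))
instance (list : List Int) (start : Int) (stop : Int) (num : Int) (left : Bool) : Decidable (Pre_directionalSearch list start stop num left) := by unfold Pre_directionalSearch; infer_instance

def pvWitness_directionalSearch : List Int × Int × Int × Int × Bool := ([1, 2, 2, 3], 0, 3, 2, true)

def Spec_directionalSearch (list : List Int) (start : Int) (stop : Int) (num : Int) (left : Bool) (out : Int) : Prop := out = directionalSearch_alt list start stop num left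
instance (list : List Int) (start : Int) (stop : Int) (num : Int) (left : Bool) (out : Int) : Decidable (Spec_directionalSearch list start stop num left out) := by unfold Spec_directionalSearch; infer_instance

-- ===== CLAIM (what is proved, stated in full; the proofs are below) =====
def Claim_equal_directionalSearch : Prop := ∀ (list : List Int) (start : Int) (stop : Int) (num : Int) (left : Bool), Dom_directionalSearch list start stop num left → Pre_directionalSearch list start stop num left → Spec_directionalSearch list start stop num left (directionalSearch list start stop num left)

-- ===== LEMMAS AND PROOFS =====

-- Loop invariant: with the window lower bound nonnegative, the loop returns A's recursive
-- answer on the window if that answer is not -1, and otherwise its accumulator.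
lemma dsLoop_eq (list : List Int) (num : Int) (left : Bool) :
    ∀ (n : Nat) (lo hi res : Int), (hi + 1 - lo).toNat ≤ n → 0 ≤ lo →
      dsLoop list num left lo hi res =
        if directionalSearch list lo hi num left ≠ -1 then directionalSearch list lo hi num left
        else res := by
  intro n
  induction n with
  | zero =>
    intro lo hi res hn h0
    have hgt : lo > hi := by omega
    rw [dsLoop, directionalSearch]
    simp [hgt]
  | succ n ih =>
    intro lo hi res hn h0
    by_cases hgt : lo > hi
    · rw [dsLoop, directionalSearch]
      simp [hgt]
    · have hb := PySem.Int.floordiv_two_mid_bounds (lo := lo) (hi := hi) (by omega)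
      rw [dsLoop, directionalSearch, Int.add_comm hi lo]
      simp only [if_neg hgt]
      cases left with
      | true =>
        simp only [ite_true]
        by_cases hv : PySem.List.pyGetD list (PySem.Int.floordiv (lo + hi) 2) 0 ≥ num
        · rw [if_pos hv, if_pos hv, ih _ _ _ (by omega) h0]
          split_ifs <;> omega
        · rw [if_neg hv, if_neg hv, ih _ _ _ (by omega) (by omega)]
          split_ifs <;> omega
      | false =>
        simp only [Bool.false_eq_true, ite_false]
        by_cases hv : PySem.List.pyGetD list (PySem.Int.floordiv (lo + hi) 2) 0 ≤ num
        · rw [if_pos hv, if_pos hv, ih _ _ _ (by omega) (by omega)]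
          split_ifs <;> omega
        · rw [if_neg hv, if_neg hv, ih _ _ _ (by omega) h0]
          split_ifs <;> omega

-- ===== VERDICT (by name: the statement is the Claim_ definition above) =====
theorem directionalSearch_spec : Claim_equal_directionalSearch := by
  intro list start stop num left _dom hpre
  unfold Spec_directionalSearch directionalSearch_alt
  by_cases hgt : start > stop
  · rw [dsLoop, directionalSearch]
    simp [hgt]
  · have h0 : 0 ≤ start := by
      rcases hpre with h | h
      · omega
      · exact h.1
    rw [dsLoop_eq list num left (stop + 1 - start).toNat start stop (-1) le_rfl h0]
    split_ifs with h
    · rfl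
    · omega
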